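-- pv_equiv track=rewrite | github.com/oyi77/1ai-poly-trader | backend/core/trade_attempts.py | make_reason_code
-- ===== SOURCE A (Python) =====
-- def make_reason_code(reason: str | None, prefix: str = "REJECTED") -> str:
--     """Convert arbitrary operator text into a stable machine-readable code."""
--
--     text_value = (reason or "unknown").strip().lower()
--     if "duplicate" in text_value:
--         suffix = "DUPLICATE_OPEN_POSITION"
--     elif "bot not running" in text_value or "not running" in text_value:
--         suffix = "BOT_NOT_RUNNING"
--     elif "no execution context" in text_value:
--         suffix = "NO_EXECUTION_CONTEXT"
--     elif "confidence" in text_value: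
--         suffix = "LOW_CONFIDENCE"
--     elif "daily loss" in text_value or "drawdown" in text_value:
--         suffix = "DRAWDOWN_BREAKER"
--     elif "max exposure" in text_value:
--         suffix = "MAX_EXPOSURE"
--     elif "slippage" in text_value:
--         suffix = "SLIPPAGE_LIMIT"
--     elif "below minimum" in text_value or "minimum" in text_value:
--         suffix = "ORDER_TOO_SMALL"
--     elif "token" in text_value:
--         suffix = "MISSING_TOKEN_ID"
--     elif "clob" in text_value or "broker" in text_value or "order" in text_value:
--         suffix = "BROKER_REJECTED"
--     elif "validation" in text_value:
--         suffix = "VALIDATION_FAILED"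
--     else:
--         cleaned = "".join(ch if ch.isalnum() else "_" for ch in text_value.upper())
--         suffix = "_".join(part for part in cleaned.split("_") if part)[:64] or "UNKNOWN"
--     return f"{prefix}_{suffix}"
-- ===== SOURCE B (Python) =====
-- _RULES = [
--     (("duplicate",), "DUPLICATE_OPEN_POSITION"),
--     (("bot not running", "not running"), "BOT_NOT_RUNNING"),
--     (("no execution context",), "NO_EXECUTION_CONTEXT"),
--     (("confidence",), "LOW_CONFIDENCE"),
--     (("daily loss", "drawdown"), "DRAWDOWN_BREAKER"),
--     (("max exposure",), "MAX_EXPOSURE"),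
--     (("slippage",), "SLIPPAGE_LIMIT"),
--     (("below minimum", "minimum"), "ORDER_TOO_SMALL"),
--     (("token",), "MISSING_TOKEN_ID"),
--     (("clob", "broker", "order"), "BROKER_REJECTED"),
--     (("validation",), "VALIDATION_FAILED"),
-- ]
--
--
-- def make_reason_code(reason, prefix="REJECTED"):
--     text_value = (reason or "unknown").strip().lower()
--     for keywords, suffix in _RULES:
--         if any(kw in text_value for kw in keywords):
--             return f"{prefix}_{suffix}"
--     # fallback: collect maximal alphanumeric runs in one pass, join with "_"
--     parts = []
--     run = ""
--     for ch in text_value.upper():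
--         if ch.isalnum():
--             run += ch
--         elif run:
--             parts.append(run)
--             run = ""
--     if run:
--         parts.append(run)
--     suffix = "_".join(parts)[:64] or "UNKNOWN"
--     return f"{prefix}_{suffix}"
-- ===== Notes on version B (the rewrite author's own statement) =====
-- stated objective: simpler
-- what changed: The eleven-branch if/elif keyword chain becomes one ordered rule table (keywords, suffix) scanned for the first match, and the fallback's map/split/filter/join sanitiser becomes a single pass that collects maximal alphanumeric runs directly.
import Mathlib
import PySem

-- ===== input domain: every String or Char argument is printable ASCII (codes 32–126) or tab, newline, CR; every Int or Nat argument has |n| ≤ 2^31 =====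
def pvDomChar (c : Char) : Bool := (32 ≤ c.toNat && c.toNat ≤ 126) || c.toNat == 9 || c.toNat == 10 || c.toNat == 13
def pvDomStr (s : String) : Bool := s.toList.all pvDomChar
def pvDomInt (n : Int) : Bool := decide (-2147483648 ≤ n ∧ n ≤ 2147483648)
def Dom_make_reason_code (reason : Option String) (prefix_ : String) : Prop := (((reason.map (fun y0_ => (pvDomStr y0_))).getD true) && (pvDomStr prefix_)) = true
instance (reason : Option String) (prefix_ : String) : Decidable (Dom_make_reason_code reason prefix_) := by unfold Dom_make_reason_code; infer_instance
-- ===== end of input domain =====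

-- B replaces A's eleven-branch if/elif keyword chain by one ordered rule table scanned for
-- the first match, and replaces the else-branch's map/split/filter/join sanitiser by a single
-- pass collecting maximal alphanumeric runs (objective: simpler decomposition, same cost).


-- ===== PORT A =====
-- text_value = (reason or "unknown").strip().lower()   (empty string is falsy)
def pvTextValue (reason : Option String) : List Char :=
  PySem.Chars.lower (PySem.Chars.strip
    ((match reason with
      | some s => if s.toList.isEmpty then "unknown" else s
      | none => "unknown").toList))

-- A's else branch: cleaned = "".join(ch if ch.isalnum() else "_" for ch in text_value.upper());
-- suffix = "_".join(part for part in cleaned.split("_") if part)[:64] or "UNKNOWN"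
def pvFallbackA (tv : List Char) : List Char :=
  let cleaned := (PySem.Chars.upper tv).map (fun ch => if PySem.Chars.isalnum ch then ch else '_')
  let joined := (PySem.Chars.join "_".toList
    ((PySem.Chars.splitOn cleaned "_".toList).filter (fun part => !part.isEmpty))).take 64
  if joined.isEmpty then "UNKNOWN".toList else joined

-- A's if/elif chain choosing the suffix
def pvChainA (tv : List Char) : List Char :=
  if PySem.Chars.isIn "duplicate".toList tv then "DUPLICATE_OPEN_POSITION".toList
  else if PySem.Chars.isIn "bot not running".toList tv || PySem.Chars.isIn "not running".toList tv then "BOT_NOT_RUNNING".toList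
  else if PySem.Chars.isIn "no execution context".toList tv then "NO_EXECUTION_CONTEXT".toList
  else if PySem.Chars.isIn "confidence".toList tv then "LOW_CONFIDENCE".toList
  else if PySem.Chars.isIn "daily loss".toList tv || PySem.Chars.isIn "drawdown".toList tv then "DRAWDOWN_BREAKER".toList
  else if PySem.Chars.isIn "max exposure".toList tv then "MAX_EXPOSURE".toList
  else if PySem.Chars.isIn "slippage".toList tv then "SLIPPAGE_LIMIT".toList
  else if PySem.Chars.isIn "below minimum".toList tv || PySem.Chars.isIn "minimum".toList tv then "ORDER_TOO_SMALL".toList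
  else if PySem.Chars.isIn "token".toList tv then "MISSING_TOKEN_ID".toList
  else if PySem.Chars.isIn "clob".toList tv || PySem.Chars.isIn "broker".toList tv || PySem.Chars.isIn "order".toList tv then "BROKER_REJECTED".toList
  else if PySem.Chars.isIn "validation".toList tv then "VALIDATION_FAILED".toList
  else pvFallbackA tv

def make_reason_code (reason : Option String) (prefix_ : String) : String :=
  let tv := pvTextValue reason
  String.ofList (prefix_.toList ++ '_' :: pvChainA tv)

-- ===== PORT B =====
-- the ordered rule table (tuple of keywords, suffix), same priority order
def pvRules : List (List (List Char) × List Char) :=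
  [ (["duplicate".toList], "DUPLICATE_OPEN_POSITION".toList)
  , (["bot not running".toList, "not running".toList], "BOT_NOT_RUNNING".toList)
  , (["no execution context".toList], "NO_EXECUTION_CONTEXT".toList)
  , (["confidence".toList], "LOW_CONFIDENCE".toList)
  , (["daily loss".toList, "drawdown".toList], "DRAWDOWN_BREAKER".toList)
  , (["max exposure".toList], "MAX_EXPOSURE".toList)
  , (["slippage".toList], "SLIPPAGE_LIMIT".toList)
  , (["below minimum".toList, "minimum".toList], "ORDER_TOO_SMALL".toList)
  , (["token".toList], "MISSING_TOKEN_ID".toList)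
  , (["clob".toList, "broker".toList, "order".toList], "BROKER_REJECTED".toList)
  , (["validation".toList], "VALIDATION_FAILED".toList) ]

-- 'for keywords, suffix in _RULES: if any(kw in text_value for kw in keywords): return …'
def pvFindRule (tv : List Char) : List (List (List Char) × List Char) → Option (List Char)
  | [] => none
  | (kws, suf) :: rest =>
      if kws.any (fun kw => PySem.Chars.isIn kw tv) then some suf else pvFindRule tv rest

-- one char of B's fallback loop: state (parts, run) updated by ch of text_value.upper()
def pvStep (st : List (List Char) × List Char) (ch : Char) : List (List Char) × List Char :=
  if PySem.Chars.isalnum ch then (st.1, st.2 ++ [ch])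
  else if !st.2.isEmpty then (st.1 ++ [st.2], []) else (st.1, [])

-- B's fallback: one pass collecting maximal alphanumeric runs, then join/truncate
def pvFallbackB (tv : List Char) : List Char :=
  let st := (PySem.Chars.upper tv).foldl pvStep ([], [])
  let parts := if !st.2.isEmpty then st.1 ++ [st.2] else st.1
  let joined := (PySem.Chars.join "_".toList parts).take 64
  if joined.isEmpty then "UNKNOWN".toList else joined

def make_reason_code_alt (reason : Option String) (prefix_ : String) : String :=
  let tv := pvTextValue reason
  let suffix : List Char :=
    match pvFindRule tv pvRules with
    | some suf => suf
    | none => pvFallbackB tv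
  String.ofList (prefix_.toList ++ '_' :: suffix)

-- ===== PRECONDITION & SPEC =====
def Spec_make_reason_code (reason : Option String) (prefix_ : String) (out : String) : Prop := out = make_reason_code_alt reason prefix_
instance (reason : Option String) (prefix_ : String) (out : String) : Decidable (Spec_make_reason_code reason prefix_ out) := by unfold Spec_make_reason_code; infer_instance

-- ===== CLAIM (what is proved, stated in full; the proofs are below) =====
def Claim_equal_make_reason_code : Prop := ∀ (reason : Option String) (prefix_ : String), Dom_make_reason_code reason prefix_ → Spec_make_reason_code reason prefix_ (make_reason_code reason prefix_)

-- ===== LEMMAS AND PROOFS =====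

-- simple structural split-on-'_' (pre = chars gathered since the last separator)
def pvSplitU (pre : List Char) : List Char → List (List Char)
  | [] => [pre]
  | c :: rest => if c = '_' then pre :: pvSplitU [] rest else pvSplitU (pre ++ [c]) rest

theorem pv_go_eq (fuel : Nat) : ∀ (l cur : List Char) (acc : List (List Char)),
    l.length < fuel →
    PySem.Chars.splitOn.go "_".toList fuel l cur acc = acc.reverse ++ pvSplitU cur.reverse l := by
  induction fuel with
  | zero => intro l cur acc h; omega
  | succ fuel ih =>
    intro l cur acc h
    cases l with
    | nil => simp [PySem.Chars.splitOn.go, pvSplitU]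
    | cons c rest =>
      by_cases hc : c = '_'
      · subst hc
        have hp : List.isPrefixOf "_".toList ('_' :: rest) = true := by
          simp [List.isPrefixOf]
        rw [PySem.Chars.splitOn.go]
        simp only [hp, if_true]
        have hd : List.drop "_".toList.length ('_' :: rest) = rest := by simp
        rw [hd, ih rest [] (cur.reverse :: acc) (by simp at h ⊢; omega)]
        simp [pvSplitU]
      · have hp : List.isPrefixOf "_".toList (c :: rest) = false := by
          simp [List.isPrefixOf]
          intro h'; exact absurd h'.symm hc
        rw [PySem.Chars.splitOn.go]
        simp only [hp, Bool.false_eq_true, ite_false]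
        rw [ih rest (c :: cur) acc (by simp at h ⊢; omega)]
        simp [pvSplitU, hc]

theorem pv_splitOn_eq (s : List Char) :
    PySem.Chars.splitOn s "_".toList = pvSplitU [] s := by
  have := pv_go_eq (s.length + 1) s [] [] (by omega)
  simpa [PySem.Chars.splitOn] using this

-- the cleaning map of A's fallback
def pvClean (ch : Char) : Char := if PySem.Chars.isalnum ch then ch else '_'

theorem pv_fold_eq : ∀ (u : List Char) (parts : List (List Char)) (run : List Char),
    (let st := u.foldl pvStep (parts, run)
     if !st.2.isEmpty then st.1 ++ [st.2] else st.1) =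
    parts ++ (pvSplitU run (u.map pvClean)).filter (fun part => !part.isEmpty) := by
  intro u
  induction u with
  | nil =>
    intro parts run
    cases run <;> simp [pvSplitU]
  | cons c rest ih =>
    intro parts run
    by_cases ha : PySem.Chars.isalnum c = true
    · have hne : c ≠ '_' := by
        intro h; subst h
        exact absurd ha (by decide)
      simp only [List.foldl_cons, List.map_cons, pvStep, ha, if_pos, pvClean]
      rw [pvSplitU]
      simp only [hne, ite_false]
      exact ih parts (run ++ [c])
    · have ha' : PySem.Chars.isalnum c = false := by simpa using ha
      simp only [List.foldl_cons, List.map_cons, pvStep, ha', pvClean, Bool.false_eq_true,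
        ite_false]
      rw [pvSplitU]
      simp only [ite_true]
      cases hr : run with
      | nil => simpa using ih parts []
      | cons a b =>
        simp only [List.isEmpty_cons, Bool.not_false, ite_true, List.filter_cons]
        rw [ih (parts ++ [a :: b]) []]
        simp

-- A's fallback suffix equals B's fallback suffix, for every text value
theorem pv_fallback_eq (tv : List Char) : pvFallbackA tv = pvFallbackB tv := by
  unfold pvFallbackA pvFallbackB
  have h1 := pv_splitOn_eq ((PySem.Chars.upper tv).map pvClean)
  have h2 := pv_fold_eq (PySem.Chars.upper tv) [] []
  simp only [List.nil_append] at h2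
  simp only [show (fun ch => if PySem.Chars.isalnum ch then ch else '_') = pvClean from rfl, h1]
  rw [h2]

-- A's chain equals B's first-matching-rule scan, for every text value
theorem pv_chain_eq (tv : List Char) :
    pvChainA tv = (match pvFindRule tv pvRules with
                   | some suf => suf
                   | none => pvFallbackB tv) := by
  unfold pvChainA
  simp only [pvFindRule, pvRules, List.any_cons, List.any_nil, Bool.or_false, Bool.or_assoc]
  by_cases h1 : PySem.Chars.isIn "duplicate".toList tv = true
  · simp only [if_pos h1]
  by_cases h2 : (PySem.Chars.isIn "bot not running".toList tv || PySem.Chars.isIn "not running".toList tv) = true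
  · simp only [if_neg h1, if_pos h2]
  by_cases h3 : PySem.Chars.isIn "no execution context".toList tv = true
  · simp only [if_neg h1, if_neg h2, if_pos h3]
  by_cases h4 : PySem.Chars.isIn "confidence".toList tv = true
  · simp only [if_neg h1, if_neg h2, if_neg h3, if_pos h4]
  by_cases h5 : (PySem.Chars.isIn "daily loss".toList tv || PySem.Chars.isIn "drawdown".toList tv) = true
  · simp only [if_neg h1, if_neg h2, if_neg h3, if_neg h4, if_pos h5]
  by_cases h6 : PySem.Chars.isIn "max exposure".toList tv = true
  · simp only [if_neg h1, if_neg h2, if_neg h3, if_neg h4, if_neg h5, if_pos h6]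
  by_cases h7 : PySem.Chars.isIn "slippage".toList tv = true
  · simp only [if_neg h1, if_neg h2, if_neg h3, if_neg h4, if_neg h5, if_neg h6, if_pos h7]
  by_cases h8 : (PySem.Chars.isIn "below minimum".toList tv || PySem.Chars.isIn "minimum".toList tv) = true
  · simp only [if_neg h1, if_neg h2, if_neg h3, if_neg h4, if_neg h5, if_neg h6, if_neg h7, if_pos h8]
  by_cases h9 : PySem.Chars.isIn "token".toList tv = true
  · simp only [if_neg h1, if_neg h2, if_neg h3, if_neg h4, if_neg h5, if_neg h6, if_neg h7, if_neg h8, if_pos h9]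
  by_cases h10 : (PySem.Chars.isIn "clob".toList tv || (PySem.Chars.isIn "broker".toList tv || PySem.Chars.isIn "order".toList tv)) = true
  · simp only [if_neg h1, if_neg h2, if_neg h3, if_neg h4, if_neg h5, if_neg h6, if_neg h7, if_neg h8, if_neg h9, if_pos h10]
  by_cases h11 : PySem.Chars.isIn "validation".toList tv = true
  · simp only [if_neg h1, if_neg h2, if_neg h3, if_neg h4, if_neg h5, if_neg h6, if_neg h7, if_neg h8, if_neg h9, if_neg h10, if_pos h11]
  simp only [if_neg h1, if_neg h2, if_neg h3, if_neg h4, if_neg h5, if_neg h6, if_neg h7, if_neg h8, if_neg h9, if_neg h10, if_neg h11]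
  exact pv_fallback_eq tv

-- ===== VERDICT (by name: the statement is the Claim_ definition above) =====
theorem make_reason_code_spec : Claim_equal_make_reason_code := by
  intro reason prefix_ _
  unfold Spec_make_reason_code make_reason_code make_reason_code_alt
  simp only [pv_chain_eq]
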